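-- pv_equiv track=rewrite | github.com/somyonn/drag | scripts/run_domain_demo.py | route_services
-- ===== SOURCE A (Python) =====
-- def route_services(query: str) -> list[str]:
--     q = query.lower()
--     selected: list[str] = []
--     if any(k in q for k in ("iam", "role", "policy", "permission", "access key")):
--         selected.append("iam")
--     if any(k in q for k in ("s3", "bucket", "object", "lifecycle", "presigned")):
--         selected.append("s3")
--     if any(k in q for k in ("ec2", "instance", "ami", "eip", "autoscaling")):
--         selected.append("ec2")
--     return selected
-- ===== SOURCE B (Python) =====
-- _TABLE = [
--     ("iam", ("iam", "role", "policy", "permission", "access key")),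
--     ("s3", ("s3", "bucket", "object", "lifecycle", "presigned")),
--     ("ec2", ("ec2", "instance", "ami", "eip", "autoscaling")),
-- ]
-- _LENS = sorted({len(k) for _, kws in _TABLE for k in kws})
--
--
-- def route_services(query: str) -> list[str]:
--     # Index the query once: build the set of all its substrings whose length is a
--     # keyword length, then each service is selected by pure set-membership lookups.
--     q = query.lower()
--     grams = {q[i:i + L] for L in _LENS for i in range(len(q) - L + 1)}
--     return [name for name, kws in _TABLE if not grams.isdisjoint(kws)]
-- ===== Notes on version B (the rewrite author's own statement) =====
-- stated objective: alternative
-- what changed: Instead of scanning the query per keyword, B builds one set of all query substrings of the relevant lengths (n-gram index) and selects each service from an ordered (service, keywords) table by pure set-membership lookups.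
import Mathlib
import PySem

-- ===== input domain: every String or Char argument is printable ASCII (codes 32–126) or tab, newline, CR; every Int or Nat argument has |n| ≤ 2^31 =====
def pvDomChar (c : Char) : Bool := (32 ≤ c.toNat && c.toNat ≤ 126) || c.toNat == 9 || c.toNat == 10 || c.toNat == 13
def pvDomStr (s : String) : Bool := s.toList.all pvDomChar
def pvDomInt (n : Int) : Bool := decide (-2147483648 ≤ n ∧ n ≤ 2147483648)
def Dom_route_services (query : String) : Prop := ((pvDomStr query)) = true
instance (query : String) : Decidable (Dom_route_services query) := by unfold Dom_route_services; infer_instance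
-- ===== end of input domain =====

-- B indexes the query once into a set of all its substrings of keyword lengths (n-grams),
-- then selects each service by pure set-membership lookups instead of per-keyword substring scans.

-- ===== PORT A =====
def route_services (query : String) : List String :=
  let q := PySem.Str.lower query
  let selected : List String := []
  let selected :=
    if (["iam", "role", "policy", "permission", "access key"].any
        (fun k => PySem.Str.isIn k q)) then selected ++ ["iam"] else selected
  let selected :=
    if (["s3", "bucket", "object", "lifecycle", "presigned"].any
        (fun k => PySem.Str.isIn k q)) then selected ++ ["s3"] else selected
  let selected :=
    if (["ec2", "instance", "ami", "eip", "autoscaling"].any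
        (fun k => PySem.Str.isIn k q)) then selected ++ ["ec2"] else selected
  selected

-- ===== PORT B =====
def pvTable : List (String × List String) :=
  [("iam", ["iam", "role", "policy", "permission", "access key"]),
   ("s3", ["s3", "bucket", "object", "lifecycle", "presigned"]),
   ("ec2", ["ec2", "instance", "ami", "eip", "autoscaling"])]

-- _LENS = sorted({len(k) for _, kws in _TABLE for k in kws})
def pvLens : List Int :=
  PySem.List.sorted
    (PySem.Set.ofList (pvTable.flatMap (fun p => p.2.map PySem.Str.len)))
    (fun x => x) false

-- grams = {q[i:i+L] for L in _LENS for i in range(len(q) - L + 1)}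
def pvGrams (q : List Char) : PySem.Set (List Char) :=
  PySem.Set.ofList (pvLens.flatMap (fun L =>
    (PySem.List.pyRange 0 ((q.length : Int) - L + 1)).map (fun i =>
      PySem.List.slice q (some i) (some (i + L)))))

def route_services_alt (query : String) : List String :=
  let q := PySem.Str.lower query
  let grams := pvGrams q.toList
  -- 'not grams.isdisjoint(kws)' = some keyword of kws is a member of grams
  (pvTable.filter (fun p => p.2.any (fun k => PySem.Set.contains grams k.toList))).map
    Prod.fst

-- ===== PRECONDITION & SPEC =====
def Spec_route_services (query : String) (out : List String) : Prop := out = route_services_alt query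
instance (query : String) (out : List String) : Decidable (Spec_route_services query out) := by unfold Spec_route_services; infer_instance

-- ===== CLAIM (what is proved, stated in full; the proofs are below) =====
def Claim_equal_route_services : Prop := ∀ (query : String), Dom_route_services query → Spec_route_services query (route_services query)

-- ===== LEMMAS AND PROOFS =====

-- a string k is among the collected n-grams of cs iff it occurs in cs (requires its length listed)
lemma gram_mem_iff (cs k : List Char) (lens : List Int)
    (hpos : ∀ L ∈ lens, 0 ≤ L) (hmem : (k.length : Int) ∈ lens) :
    (k ∈ lens.flatMap (fun L => (PySem.List.pyRange 0 ((cs.length : Int) - L + 1)).map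
        (fun i => PySem.List.slice cs (some i) (some (i + L)))))
      ↔ PySem.Chars.isIn k cs = true := by
  constructor
  · intro h
    rw [List.mem_flatMap] at h
    obtain ⟨L, hL, h⟩ := h
    rw [List.mem_map] at h
    obtain ⟨i, hi, rfl⟩ := h
    rw [PySem.List.mem_pyRange_one] at hi
    have h0 : (0:Int) ≤ i := hi.1
    have hL0 : (0:Int) ≤ L := hpos L hL
    rw [PySem.List.slice_toNat cs h0 (by omega)]
    rw [← PySem.Chars.exists_prefix_drop_iff_isIn]
    exact ⟨i.toNat, List.take_prefix _ _⟩
  · intro h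
    rw [PySem.Chars.isIn_iff_infix] at h
    obtain ⟨s, t, rfl⟩ := h
    rw [List.mem_flatMap]
    refine ⟨(k.length : Int), hmem, ?_⟩
    rw [List.mem_map]
    refine ⟨(s.length : Int), ?_, ?_⟩
    · rw [PySem.List.mem_pyRange_one]
      constructor
      · positivity
      · simp [List.length_append]; omega
    · rw [PySem.List.slice_toNat _ (by positivity) (by positivity)]
      have : ((s.length : Int) + (k.length : Int)).toNat - (s.length:Int).toNat = k.length := by
        omega
      rw [this]
      simp

lemma contains_pvGrams (cs k : List Char) (hmem : (k.length : Int) ∈ pvLens) :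
    PySem.Set.contains (pvGrams cs) k = PySem.Chars.isIn k cs := by
  have hpos : ∀ L ∈ pvLens, (0:Int) ≤ L := by decide
  apply Bool.eq_iff_iff.mpr
  rw [PySem.Set.contains_iff, pvGrams, PySem.Set.mem_ofList,
    gram_mem_iff cs k pvLens hpos hmem]

lemma alt_cond (q : String) (ks : List String)
    (h : ∀ k ∈ ks, ((k.toList.length : Int) ∈ pvLens)) :
    ks.any (fun k => PySem.Set.contains (pvGrams q.toList) k.toList)
      = ks.any (fun k => PySem.Str.isIn k q) := by
  apply PySem.List.any_congr_mem
  intro k hk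
  rw [contains_pvGrams q.toList k.toList (h k hk)]
  simp

-- ===== VERDICT (by name: the statement is the Claim_ definition above) =====
theorem route_services_spec : Claim_equal_route_services := by
  intro query _
  unfold Spec_route_services
  show route_services query = route_services_alt query
  have e1 := alt_cond (PySem.Str.lower query)
    ["iam", "role", "policy", "permission", "access key"] (by decide)
  have e2 := alt_cond (PySem.Str.lower query)
    ["s3", "bucket", "object", "lifecycle", "presigned"] (by decide)
  have e3 := alt_cond (PySem.Str.lower query)
    ["ec2", "instance", "ami", "eip", "autoscaling"] (by decide)
  cases h1 : (["iam", "role", "policy", "permission", "access key"].any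
      (fun k => PySem.Str.isIn k (PySem.Str.lower query))) <;>
  cases h2 : (["s3", "bucket", "object", "lifecycle", "presigned"].any
      (fun k => PySem.Str.isIn k (PySem.Str.lower query))) <;>
  cases h3 : (["ec2", "instance", "ami", "eip", "autoscaling"].any
      (fun k => PySem.Str.isIn k (PySem.Str.lower query))) <;>
  simp only [route_services, route_services_alt, pvTable, List.filter, List.map,
    e1, e2, e3, h1, h2, h3] <;> decide
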